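-- pv_equiv track=rewrite | github.com/eating-SUN/bio2502-group-project | app/pdf_report.py | _format_sequence
-- ===== SOURCE A (Python) =====
-- def _format_sequence(sequence, mut_pos, line_length=80):
--     """格式化序列，添加行号和高亮突变位置"""
--     if not sequence:
--         return ""
--
--     formatted = []
--     # 将序列分割为多行
--     for i in range(0, len(sequence), line_length):
--         chunk = sequence[i:i+line_length]
--         line_num = i + 1  # 氨基酸位置从1开始
--         line_header = f"{line_num:>4} | "
--
--         # 处理突变高亮
--         if 0 <= mut_pos < len(sequence) and i <= mut_pos < i+line_length:
--             pos_in_line = mut_pos - i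
--             # 在突变位置前后添加标记
--             highlighted_chunk = (
--                 chunk[:pos_in_line] +
--                 "[" + chunk[pos_in_line] + "]" +
--                 chunk[pos_in_line+1:]
--             )
--             formatted.append(line_header + highlighted_chunk)
--         else:
--             formatted.append(line_header + chunk)
--
--     return "\n".join(formatted)
-- ===== SOURCE B (Python) =====
-- def _format_sequence(sequence, mut_pos, line_length=80):
--     """Single character-streaming pass: no chunking/slicing; a column counter
--     decides when a header is due, and the mutated character is bracketed as it
--     streams by."""
--     if not sequence:
--         return ""
--     highlight = 0 <= mut_pos < len(sequence)
--     parts = []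
--     col = line_length  # a header is due before the first character
--     for i, ch in enumerate(sequence):
--         if col >= line_length:
--             parts.append(("\n" if parts else "") + f"{i + 1:>4} | ")
--             col = 0
--         parts.append("[" + ch + "]" if highlight and i == mut_pos else ch)
--         col += 1
--     return "".join(parts)
-- ===== Notes on version B (the rewrite author's own statement) =====
-- stated objective: alternative
-- what changed: B abandons A's chunk-and-slice loop entirely: it streams the sequence character by character in one fold, a column counter decides when a line header (and newline) is due, and the mutated character is bracketed as it streams by, so no chunk list, slicing or per-line highlight test exists.
-- outside the precondition, e.g. on _format_sequence('ABCDE', 2, -2): A returns '', B returns '   1 | A\n   2 | B\n   3 | [C]\n   4 | D\n   5 | E'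
import Mathlib
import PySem

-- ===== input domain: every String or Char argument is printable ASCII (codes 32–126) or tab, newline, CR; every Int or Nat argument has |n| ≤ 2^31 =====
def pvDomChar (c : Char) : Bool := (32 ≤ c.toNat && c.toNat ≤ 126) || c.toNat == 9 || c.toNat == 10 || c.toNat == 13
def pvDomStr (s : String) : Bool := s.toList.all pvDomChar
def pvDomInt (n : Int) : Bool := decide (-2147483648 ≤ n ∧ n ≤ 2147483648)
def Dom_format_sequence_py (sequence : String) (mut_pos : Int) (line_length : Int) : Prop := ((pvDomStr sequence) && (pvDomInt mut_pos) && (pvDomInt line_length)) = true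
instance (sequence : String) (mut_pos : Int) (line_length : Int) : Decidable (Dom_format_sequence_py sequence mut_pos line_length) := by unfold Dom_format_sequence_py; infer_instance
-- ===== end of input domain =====

-- B replaces A's chunk-and-slice loop by a single character-streaming pass with a column counter
-- (objective: alternative decomposition, same cost).

-- shared f-string helper: f"{line_num:>4} | " — right-justify decimal in width 4 with spaces (exact hand port)
def pvHeader (line_num : Int) : List Char :=
  let ds := PySem.Int.toChars line_num
  List.replicate (4 - ds.length) ' ' ++ ds ++ [' ', '|', ' ']

-- ===== PORT A =====
def format_sequence_py (sequence : String) (mut_pos : Int) (line_length : Int) : String :=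
  let s := sequence.toList
  if s = [] then "" else
  let n : Int := s.length
  let formatted : List (List Char) :=
    (PySem.List.pyRange 0 n line_length).foldl (fun acc i =>
      let chunk := PySem.List.slice s (some i) (some (i + line_length))
      let line_header := pvHeader (i + 1)
      if 0 ≤ mut_pos ∧ mut_pos < n ∧ i ≤ mut_pos ∧ mut_pos < i + line_length then
        let p := mut_pos - i
        -- chunk[p] is in range whenever this branch is taken; pyGetD's default is never used
        let highlighted := PySem.List.slice chunk none (some p) ++ ['['] ++
          [PySem.List.pyGetD chunk p ' '] ++ [']'] ++ PySem.List.slice chunk (some (p + 1)) none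
        acc ++ [line_header ++ highlighted]
      else acc ++ [line_header ++ chunk]) []
  String.ofList (PySem.Chars.join ['\n'] formatted)

-- ===== PORT B =====
-- loop body of Source B's single for-loop: state = (parts flattened, col)
def pvStep (highlight : Bool) (mut_pos line_length : Int)
    (st : List Char × Int) (ic : Int × Char) : List Char × Int :=
  let st := if st.2 ≥ line_length then
      (st.1 ++ (if st.1 = [] then [] else ['\n']) ++ pvHeader (ic.1 + 1), 0)
    else st
  (st.1 ++ (if highlight && (ic.1 == mut_pos) then ['[', ic.2, ']'] else [ic.2]), st.2 + 1)

def format_sequence_py_alt (sequence : String) (mut_pos : Int) (line_length : Int) : String :=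
  let s := sequence.toList
  if s = [] then "" else
  let highlight : Bool := decide (0 ≤ mut_pos ∧ mut_pos < (s.length : Int))
  String.ofList (((PySem.List.enumerate s).foldl
      (pvStep highlight mut_pos line_length) ([], line_length)).1)

-- ===== PRECONDITION & SPEC =====
-- Pre_ excludes nonpositive line_length with a nonempty sequence: a degenerate corner no caller
-- would specify, where A raises ValueError (range step 0) for line_length = 0 and, for negative
-- values, returns the accidental empty string of an empty range while B streams one-char lines.
def Pre_format_sequence_py (sequence : String) (mut_pos : Int) (line_length : Int) : Prop :=
  sequence.toList = [] ∨ 1 ≤ line_length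
instance (sequence : String) (mut_pos : Int) (line_length : Int) : Decidable (Pre_format_sequence_py sequence mut_pos line_length) := by unfold Pre_format_sequence_py; infer_instance

def pvWitness_format_sequence_py : String × Int × Int := ("ACDEFGH", 4, 3)

def Spec_format_sequence_py (sequence : String) (mut_pos : Int) (line_length : Int) (out : String) : Prop := out = format_sequence_py_alt sequence mut_pos line_length
instance (sequence : String) (mut_pos : Int) (line_length : Int) (out : String) : Decidable (Spec_format_sequence_py sequence mut_pos line_length out) := by unfold Spec_format_sequence_py; infer_instance

-- ===== CLAIM (what is proved, stated in full; the proofs are below) =====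
def Claim_equal_format_sequence_py : Prop := ∀ (sequence : String) (mut_pos : Int) (line_length : Int), Dom_format_sequence_py sequence mut_pos line_length → Pre_format_sequence_py sequence mut_pos line_length → Spec_format_sequence_py sequence mut_pos line_length (format_sequence_py sequence mut_pos line_length)

-- ===== LEMMAS AND PROOFS =====

-- per-character highlight piece, as Source B's loop emits it
def pvHLc (hb : Bool) (mp : Int) (ic : Int × Char) : List Char :=
  if hb && (ic.1 == mp) then ['[', ic.2, ']'] else [ic.2]

-- the lines Source B's streaming pass produces, chunk by chunk (chunk size Lp+1)
def pvLines (hb : Bool) (mp : Int) (Lp : Nat) : List Char → Int → List (List Char)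
  | [], _ => []
  | c :: cs, i0 =>
    (pvHeader (i0 + 1) ++
      (PySem.List.enumerate (c :: List.take Lp cs) i0).flatMap (pvHLc hb mp))
      :: pvLines hb mp Lp (List.drop Lp cs) (i0 + ((Lp : Int) + 1))
  termination_by s _ => s.length
  decreasing_by simp

-- proof-side abbreviations for A's chunk and highlight expressions
def pvChunk (s : List Char) (L i : Int) : List Char :=
  PySem.List.slice s (some i) (some (i + L))

def pvHL (c : List Char) (p : Int) : List Char :=
  PySem.List.slice c none (some p) ++ ['['] ++ [PySem.List.pyGetD c p ' '] ++ [']'] ++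
    PySem.List.slice c (some (p + 1)) none

def pvGA (s : List Char) (mp L i : Int) : List Char :=
  pvHeader (i + 1) ++
    (if 0 ≤ mp ∧ mp < (s.length : Int) ∧ i ≤ mp ∧ mp < i + L then pvHL (pvChunk s L i) (mp - i)
     else pvChunk s L i)

-- A's append-to-accumulator loop with a branch is a map
lemma pv_foldl_push {α β : Type} (f : List β → α → List β) (g : α → β)
    (hf : ∀ acc x, f acc x = acc ++ [g x]) :
    ∀ (R : List α) (acc : List β), R.foldl f acc = acc ++ R.map g := by
  intro R
  induction R with
  | nil => intro acc; simp
  | cons x R ih => intro acc; simp [hf, ih, List.append_assoc]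

-- inside one line (no header due): the fold appends the per-char pieces
lemma pv_chunk_fold (hb : Bool) (mp L : Int) :
    ∀ (c : List Char) (i0 : Int) (acc : List Char) (col : Int),
      0 ≤ col → col + (c.length : Int) ≤ L →
      (PySem.List.enumerate c i0).foldl (pvStep hb mp L) (acc, col)
        = (acc ++ (PySem.List.enumerate c i0).flatMap (pvHLc hb mp), col + c.length) := by
  intro c
  induction c with
  | nil => intro i0 acc col h0 hle; simp [PySem.List.enumerate_nil]
  | cons ch ct ih =>
    intro i0 acc col h0 hle
    rw [PySem.List.enumerate_cons]
    simp only [List.foldl_cons]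
    have hlt : ¬ (col ≥ L) := by
      simp only [List.length_cons] at hle; push_cast at hle; omega
    have hstep : pvStep hb mp L (acc, col) (i0, ch) = (acc ++ pvHLc hb mp (i0, ch), col + 1) := by
      simp [pvStep, pvHLc, hlt]
    rw [hstep, ih (i0 + 1) (acc ++ pvHLc hb mp (i0, ch)) (col + 1) (by omega)
      (by simp only [List.length_cons] at hle; push_cast at hle ⊢; omega)]
    simp only [List.flatMap_cons, List.length_cons]
    refine Prod.ext ?_ ?_
    · simp [List.append_assoc]
    · push_cast; omega

-- the streaming pass, from a fresh line boundary, emits pvLines joined by newlines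
lemma pv_fold_lines (hb : Bool) (mp : Int) (Lp : Nat) :
    ∀ (m : Nat) (s : List Char), s.length ≤ m → s ≠ [] → ∀ (i0 : Int) (acc : List Char),
      ((PySem.List.enumerate s i0).foldl (pvStep hb mp ((Lp : Int) + 1)) (acc, (Lp : Int) + 1)).1
        = acc ++ (if acc = [] then [] else ['\n']) ++
            PySem.Chars.join ['\n'] (pvLines hb mp Lp s i0) := by
  intro m
  induction m with
  | zero =>
    intro s hlen hne i0 acc
    interval_cases h : s.length
    · exact absurd (List.eq_nil_of_length_eq_zero h) hne
  | succ m ih =>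
    intro s hlen hne i0 acc
    obtain ⟨x, xs, rfl⟩ := List.exists_cons_of_ne_nil hne
    have hsplit : x :: xs = (x :: List.take Lp xs) ++ List.drop Lp xs := by simp
    have henum : PySem.List.enumerate (x :: xs) i0
        = PySem.List.enumerate (x :: List.take Lp xs) i0 ++
          PySem.List.enumerate (List.drop Lp xs) (i0 + ((x :: List.take Lp xs).length : Int)) := by
      conv_lhs => rw [hsplit]
      rw [PySem.List.enumerate_append]
    rw [henum, List.foldl_append]
    -- first iteration: header is due (col = L ≥ L)
    rw [PySem.List.enumerate_cons, List.foldl_cons]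
    have hstep : pvStep hb mp ((Lp : Int) + 1) (acc, (Lp : Int) + 1) (i0, x)
        = ((acc ++ (if acc = [] then [] else ['\n']) ++ pvHeader (i0 + 1)) ++ pvHLc hb mp (i0, x), 1) := by
      simp [pvStep, pvHLc]
    rw [hstep]
    -- rest of the first chunk: no header due
    rw [pv_chunk_fold hb mp ((Lp : Int) + 1) (List.take Lp xs) (i0 + 1) _ 1 (by omega)
      (by have := List.length_take_le Lp xs; omega)]
    set acc1 := acc ++ (if acc = [] then [] else ['\n']) ++ pvHeader (i0 + 1) ++ pvHLc hb mp (i0, x) ++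
      List.flatMap (pvHLc hb mp) (PySem.List.enumerate (List.take Lp xs) (i0 + 1)) with hacc1
    have hline : pvLines hb mp Lp (x :: xs) i0
        = (pvHeader (i0 + 1) ++ (PySem.List.enumerate (x :: List.take Lp xs) i0).flatMap (pvHLc hb mp))
          :: pvLines hb mp Lp (List.drop Lp xs) (i0 + ((Lp : Int) + 1)) := by
      rw [pvLines]
    by_cases hr : List.drop Lp xs = []
    · -- single line
      rw [hr, PySem.List.enumerate_nil]
      simp only [List.foldl_nil]
      rw [hline, hr]
      simp only [pvLines, PySem.Chars.join_singleton, PySem.List.enumerate_cons, List.flatMap_cons]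
      simp [acc1, List.append_assoc]
    · -- another line follows: the chunk was full, so col is back at L
      have hfull : (List.take Lp xs).length = Lp := by
        rw [List.length_take]
        have : Lp ≤ xs.length := by
          by_contra hno
          exact hr (List.drop_eq_nil_of_le (by omega))
        omega
      have hacc1ne : acc1 ≠ [] := by
        rw [hacc1]
        apply List.append_ne_nil_of_left_ne_nil
        apply List.append_ne_nil_of_right_ne_nil
        unfold pvHLc
        split <;> simp
      have hcol : (1 : Int) + ((List.take Lp xs).length : Int) = (Lp : Int) + 1 := by
        rw [hfull]; omega
      rw [hcol]
      have hstart : i0 + ((x :: List.take Lp xs).length : Int) = i0 + ((Lp : Int) + 1) := by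
        simp [hfull]
      rw [hstart]
      have hlenr : (List.drop Lp xs).length ≤ m := by
        simp only [List.length_cons] at hlen
        simp only [List.length_drop]
        omega
      rw [ih (List.drop Lp xs) hlenr hr (i0 + ((Lp : Int) + 1)) acc1]
      rw [if_neg hacc1ne, hline]
      obtain ⟨y, ys, hy⟩ := List.exists_cons_of_ne_nil
        (show pvLines hb mp Lp (List.drop Lp xs) (i0 + ((Lp : Int) + 1)) ≠ [] by
          obtain ⟨z, zs, hzz⟩ := List.exists_cons_of_ne_nil hr
          rw [hzz, pvLines]; simp)
      rw [hy, PySem.Chars.join_cons_cons]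
      simp only [PySem.List.enumerate_cons, List.flatMap_cons, hacc1]
      simp [List.append_assoc]

-- no highlighted index in this chunk: the pieces are the characters themselves
lemma pv_flat_nohit (hb : Bool) (mp : Int) :
    ∀ (c : List Char) (i0 : Int), ¬ (hb = true ∧ i0 ≤ mp ∧ mp < i0 + (c.length : Int)) →
      (PySem.List.enumerate c i0).flatMap (pvHLc hb mp) = c := by
  intro c
  induction c with
  | nil => intro i0 _; simp [PySem.List.enumerate_nil]
  | cons ch ct ih =>
    intro i0 hno
    rw [PySem.List.enumerate_cons, List.flatMap_cons]
    have h1 : pvHLc hb mp (i0, ch) = [ch] := by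
      unfold pvHLc
      simp only [List.length_cons] at hno
      have : ¬ (hb = true ∧ i0 = mp) := by
        intro ⟨ha, hbq⟩
        exact hno ⟨ha, by omega, by push_cast; omega⟩
      simp only []
      rw [if_neg (by simpa [Bool.and_eq_true, beq_iff_eq] using this)]
    rw [h1, ih (i0 + 1) (by
      simp only [List.length_cons] at hno
      intro ⟨ha, h2, h3⟩
      exact hno ⟨ha, by omega, by push_cast at h3 ⊢; omega⟩)]
    rfl

-- the highlighted index is inside this chunk
lemma pv_flat_hit (hb : Bool) (mp : Int) :
    ∀ (c : List Char) (i0 : Int), hb = true → i0 ≤ mp → mp < i0 + (c.length : Int) →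
      (PySem.List.enumerate c i0).flatMap (pvHLc hb mp)
        = c.take (mp - i0).toNat ++ ['['] ++ [c.getD (mp - i0).toNat ' '] ++ [']'] ++
            c.drop ((mp - i0).toNat + 1) := by
  intro c
  induction c with
  | nil => intro i0 _ _ h; simp at h; omega
  | cons ch ct ih =>
    intro i0 hhb h1 h2
    rw [PySem.List.enumerate_cons, List.flatMap_cons]
    by_cases heq : mp = i0
    · have hp : (mp - i0).toNat = 0 := by omega
      have hhl : pvHLc hb mp (i0, ch) = ['[', ch, ']'] := by
        unfold pvHLc
        rw [hhb, heq]; simp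
      rw [hhl, hp, pv_flat_nohit hb mp ct (i0 + 1) (by intro ⟨_, hc, _⟩; omega)]
      simp
    · have hmp : i0 + 1 ≤ mp := by omega
      have hhl : pvHLc hb mp (i0, ch) = [ch] := by
        unfold pvHLc
        rw [hhb]
        simp [Ne.symm heq]
      have h2' : mp < i0 + 1 + (ct.length : Int) := by
        simp only [List.length_cons] at h2; push_cast at h2 ⊢; omega
      rw [hhl, ih (i0 + 1) hhb hmp h2']
      have hpt : (mp - i0).toNat = (mp - (i0 + 1)).toNat + 1 := by omega
      rw [hpt]
      simp

-- one streamed line equals A's line at the same offset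
lemma pv_line_eq (s : List Char) (mp L : Int) (Lp : Nat) (hL : L = (Lp : Int) + 1)
    (i0 : Nat) (hi0 : i0 < s.length) :
    pvHeader ((i0 : Int) + 1) ++
      (PySem.List.enumerate (List.take (Lp + 1) (List.drop i0 s)) (i0 : Int)).flatMap
        (pvHLc (decide (0 ≤ mp ∧ mp < (s.length : Int))) mp)
      = pvGA s mp L (i0 : Int) := by
  set hb := decide (0 ≤ mp ∧ mp < (s.length : Int)) with hhb
  set c := List.take (Lp + 1) (List.drop i0 s) with hc
  have hchunk : pvChunk s L (i0 : Int) = c := by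
    unfold pvChunk
    have heq : (i0 : Int) + L = (i0 : Int) + ((Lp + 1 : Nat) : Int) := by push_cast; omega
    rw [heq, PySem.List.slice_natCast_add]
  have hclen : c.length = min (Lp + 1) (s.length - i0) := by
    simp [hc]
  unfold pvGA
  rw [hchunk]
  congr 1
  by_cases hcond : 0 ≤ mp ∧ mp < (s.length : Int) ∧ (i0 : Int) ≤ mp ∧ mp < (i0 : Int) + L
  · rw [if_pos hcond]
    have hbt : hb = true := by rw [hhb]; simp only [decide_eq_true_eq]; exact ⟨hcond.1, hcond.2.1⟩
    have hcl : mp < (i0 : Int) + (c.length : Int) := by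
      have h1 := hcond.2.1
      have h2 := hcond.2.2.2
      rw [hclen]; push_cast; omega
    rw [pv_flat_hit hb mp c i0 hbt hcond.2.2.1 hcl]
    unfold pvHL
    have hp : ((mp - (i0 : Int)).toNat : Int) = mp - (i0 : Int) := by
      have := hcond.2.2.1; omega
    have hplt : (mp - (i0 : Int)).toNat < c.length := by omega
    rw [PySem.List.slice_to c (by omega : (0:Int) ≤ mp - (i0 : Int))]
    rw [PySem.List.slice_from c (by omega : (0:Int) ≤ mp - (i0 : Int) + 1)]
    have hg : PySem.List.pyGetD c (mp - (i0 : Int)) ' ' = c.getD (mp - (i0 : Int)).toNat ' ' := by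
      rw [← hp, PySem.List.pyGetD_natCast]; simp
    have h1 : (mp - (i0 : Int) + 1).toNat = (mp - (i0 : Int)).toNat + 1 := by omega
    rw [hg, h1]
  · rw [if_neg hcond]
    apply pv_flat_nohit
    intro ⟨hhb', h1, h2⟩
    have hmn := of_decide_eq_true (hhb ▸ hhb')
    apply hcond
    refine ⟨hmn.1, hmn.2, h1, ?_⟩
    have : (c.length : Int) ≤ (Lp : Int) + 1 := by
      rw [hclen]; push_cast; omega
    omega

-- ceiling-division bounds for the chunk count
lemma pv_ceil_le (n L : Int) (j : Nat) (hL : 0 < L) (h : n ≤ L * j) :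
    ((n + L - 1) / L).toNat ≤ j := by
  have h1 : (n + L - 1) / L ≤ ((L - 1) + L * (j : Int)) / L := Int.ediv_le_ediv hL (by omega)
  have h2 : ((L - 1) + L * (j : Int)) / L = (L - 1) / L + j := Int.add_mul_ediv_left _ _ (by omega)
  have h3 : (L - 1) / L = 0 := Int.ediv_eq_zero_of_lt (by omega) (by omega)
  omega

lemma pv_ceil_ge (n L : Int) (j : Nat) (hL : 0 < L) (h : L * j < n) :
    (j : Int) + 1 ≤ (n + L - 1) / L := by
  have hle : L * ((j : Int) + 1) ≤ n + L - 1 := by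
    rw [mul_add, mul_one]
    omega
  have h1 : (L * ((j : Int) + 1)) / L ≤ (n + L - 1) / L := Int.ediv_le_ediv hL hle
  have h2 : L * ((j : Int) + 1) / L = (j : Int) + 1 := Int.mul_ediv_cancel_left _ (by omega)
  omega

lemma pv_lines_aux (s : List Char) (mp L : Int) (Lp : Nat) (hL : L = (Lp : Int) + 1) :
    ∀ (m j : Nat), s.length ≤ m + (Lp + 1) * j →
      pvLines (decide (0 ≤ mp ∧ mp < (s.length : Int))) mp Lp
          (List.drop ((Lp + 1) * j) s) (((Lp + 1) * j : Nat) : Int)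
        = (List.range' j ((((s.length : Int) + L - 1) / L).toNat - j)).map
            (fun (k : Nat) => pvGA s mp L (L * (k : Int))) := by
  have hLpos : (0 : Int) < L := by omega
  intro m
  induction m with
  | zero =>
    intro j hlen
    simp only [Nat.zero_add] at hlen
    rw [List.drop_eq_nil_of_le hlen]
    have hK : (((s.length : Int) + L - 1) / L).toNat ≤ j :=
      pv_ceil_le _ _ _ hLpos (by rw [hL]; exact_mod_cast hlen)
    rw [Nat.sub_eq_zero_of_le hK]
    simp [pvLines]
  | succ m ih =>
    intro j hlen
    by_cases hdrop : s.length ≤ (Lp + 1) * j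
    · rw [List.drop_eq_nil_of_le hdrop]
      have hK : (((s.length : Int) + L - 1) / L).toNat ≤ j :=
        pv_ceil_le _ _ _ hLpos (by rw [hL]; exact_mod_cast hdrop)
      rw [Nat.sub_eq_zero_of_le hK]
      simp [pvLines]
    · have hlt : (Lp + 1) * j < s.length := Nat.not_le.mp hdrop
      have hne : List.drop ((Lp + 1) * j) s ≠ [] := by
        simp only [ne_eq, List.drop_eq_nil_iff]
        exact hdrop
      obtain ⟨c, cs, hccs⟩ := List.exists_cons_of_ne_nil hne
      rw [hccs, pvLines]
      have hhead : c :: List.take Lp cs = List.take (Lp + 1) (List.drop ((Lp + 1) * j) s) := by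
        rw [hccs, List.take_succ_cons]
      have htail : List.drop Lp cs = List.drop ((Lp + 1) * (j + 1)) s := by
        have h1 : List.drop Lp cs = List.drop (Lp + 1) (c :: cs) := by simp
        rw [h1, ← hccs, List.drop_drop]
        congr 1
      have hoff : ((Lp + 1) * j : Nat) < s.length := hlt
      have hKge : j + 1 ≤ (((s.length : Int) + L - 1) / L).toNat := by
        have := pv_ceil_ge (s.length : Int) L j hLpos (by rw [hL]; exact_mod_cast hlt)
        omega
      have hsub : (((s.length : Int) + L - 1) / L).toNat - j
          = ((((s.length : Int) + L - 1) / L).toNat - (j + 1)) + 1 := by omega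
      rw [hsub, List.range'_succ, List.map_cons]
      congr 1
      · -- head line
        rw [hhead]
        have := pv_line_eq s mp L Lp hL ((Lp + 1) * j) hoff
        rw [this]
        congr 1
        rw [hL]; push_cast; ring
      · -- tail lines
        rw [htail]
        have hoffInt : (((Lp + 1) * j : Nat) : Int) + ((Lp : Int) + 1)
            = (((Lp + 1) * (j + 1) : Nat) : Int) := by push_cast; ring
        rw [hoffInt]
        exact ih (j + 1) (by
          have h1 : (Lp + 1) * (j + 1) = (Lp + 1) * j + (Lp + 1) := by ring
          omega)

-- the streamed lines are exactly A's lines in chunk order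
lemma pv_lines_eq (s : List Char) (mp L : Int) (Lp : Nat) (hL : L = (Lp : Int) + 1) :
    pvLines (decide (0 ≤ mp ∧ mp < (s.length : Int))) mp Lp s 0
      = (List.range (((s.length : Int) + L - 1) / L).toNat).map
          (fun (k : Nat) => pvGA s mp L (L * (k : Int))) := by
  have h0 := pv_lines_aux s mp L Lp hL s.length 0 (by omega)
  simpa [List.range_eq_range'] using h0

-- the main case: positive line length
lemma pv_main (seq : String) (mp L : Int) (hL : 1 ≤ L) (hs : seq.toList ≠ []) :
    format_sequence_py seq mp L = format_sequence_py_alt seq mp L := by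
  have hn : 0 < (seq.toList.length : Int) := by
    cases h : seq.toList with
    | nil => exact absurd h hs
    | cons a l => simp
  set s := seq.toList with hsdef
  set n : Int := (s.length : Int) with hndef
  set Lp : Nat := (L - 1).toNat with hLpdef
  have hL' : L = (Lp : Int) + 1 := by omega
  set K : Nat := ((n + L - 1) / L).toNat with hKdef
  have hrange : PySem.List.pyRange 0 n L = (List.range K).map (fun (k : Nat) => L * (k : Int)) := by
    rw [PySem.List.pyRange_of_pos 0 n (by omega : (0:Int) < L)]
    rw [if_pos (by omega : (0:Int) < n)]
    simp only [zero_add, sub_zero, hKdef]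
  simp only [format_sequence_py, format_sequence_py_alt, ← hsdef, ← hndef, hrange]
  rw [if_neg hs, if_neg hs]
  apply congrArg
  -- A side: the accumulator loop is a map of pvGA
  have hbodyA : ∀ (acc : List (List Char)) (i : Int),
      (if 0 ≤ mp ∧ mp < n ∧ i ≤ mp ∧ mp < i + L then
        acc ++ [pvHeader (i + 1) ++
          (PySem.List.slice (PySem.List.slice s (some i) (some (i + L))) none (some (mp - i)) ++ ['['] ++
            [PySem.List.pyGetD (PySem.List.slice s (some i) (some (i + L))) (mp - i) ' '] ++ [']'] ++
            PySem.List.slice (PySem.List.slice s (some i) (some (i + L))) (some (mp - i + 1)) none)]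
      else acc ++ [pvHeader (i + 1) ++ PySem.List.slice s (some i) (some (i + L))])
      = acc ++ [pvGA s mp L i] := by
    intro acc i
    by_cases h : 0 ≤ mp ∧ mp < n ∧ i ≤ mp ∧ mp < i + L
    · rw [if_pos h]
      simp only [pvGA, pvChunk, pvHL, ← hndef, if_pos h]
    · rw [if_neg h]
      simp only [pvGA, pvChunk, ← hndef, if_neg h]
  rw [pv_foldl_push _ (pvGA s mp L) hbodyA]
  rw [List.nil_append, List.map_map]
  -- B side: the streaming pass emits the same lines
  rw [hL']
  rw [pv_fold_lines (decide (0 ≤ mp ∧ mp < n)) mp Lp s.length s le_rfl hs 0 []]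
  rw [pv_lines_eq s mp L Lp hL']
  rw [← hL', ← hndef, ← hKdef]
  rfl

-- ===== VERDICT (by name: the statement is the Claim_ definition above) =====
theorem format_sequence_py_spec : Claim_equal_format_sequence_py := by
  intro seq mp L _hdom hpre
  unfold Spec_format_sequence_py
  by_cases hs : seq.toList = []
  · simp [format_sequence_py, format_sequence_py_alt, hs]
  rcases hpre with h | hL
  · exact absurd h hs
  · exact pv_main seq mp L hL hs
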